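-- pv_equiv track=rewrite | github.com/posl/comment_recommendation | script/split_gen/2_time/zh/216_C/1.py | solve
-- ===== SOURCE A (Python) =====
-- def solve(n):
--     ans = ''
--     while n > 0:
--         if n % 2 == 0:
--             ans += 'B'
--             n //= 2
--         else:
--             ans += 'A'
--             n -= 1
--     return ans[::-1]
-- ===== SOURCE B (Python) =====
-- def solve(n):
--     if n <= 0:
--         return ''
--     bits = bin(n)[2:]
--     res = ['A']
--     for b in bits[1:]:
--         res.append('B')
--         if b == '1':
--             res.append('A')
--     return ''.join(res)
-- ===== Notes on version B (the rewrite author's own statement) =====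
-- stated objective: alternative
-- what changed: B replaces A's destructive halve/decrement loop, which builds the string LSB-first and then reverses it, by a single forward scan over the precomputed MSB-first binary digits from bin(): an 'A' for the leading bit, then a 'B' per remaining bit plus an extra 'A' whenever that bit is set, with no reversal step.
import Mathlib
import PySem

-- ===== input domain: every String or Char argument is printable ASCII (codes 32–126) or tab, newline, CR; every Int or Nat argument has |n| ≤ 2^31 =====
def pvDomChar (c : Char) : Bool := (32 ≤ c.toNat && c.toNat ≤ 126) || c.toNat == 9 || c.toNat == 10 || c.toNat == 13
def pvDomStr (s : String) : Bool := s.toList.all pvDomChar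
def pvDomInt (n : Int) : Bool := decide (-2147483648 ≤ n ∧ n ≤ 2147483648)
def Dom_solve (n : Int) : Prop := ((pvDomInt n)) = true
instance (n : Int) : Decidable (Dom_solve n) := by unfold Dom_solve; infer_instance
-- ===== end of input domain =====

-- B is an alternative decomposition: a forward scan over the MSB-first binary digits
-- instead of A's LSB-first halve/decrement loop followed by a reversal; same cost.

-- ===== PORT A =====
-- the while loop of A: state (n, ans); appends 'B' on even (n //= 2), 'A' on odd (n -= 1)
def solveLoop (n : Int) (ans : List Char) : List Char :=
  if h : n > 0 then
    if PySem.Int.mod n 2 == 0 then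
      solveLoop (PySem.Int.floordiv n 2) (ans ++ ['B'])
    else
      solveLoop (n - 1) (ans ++ ['A'])
  else ans
termination_by n.toNat
decreasing_by
  · rw [PySem.Int.floordiv_eq_ediv_of_pos (by omega : (0:Int) < 2)]; omega
  · omega

-- ans[::-1] is reversal (PySem.Str.slice?_none_none_neg_one)
def solve (n : Int) : String := String.mk (solveLoop n []).reverse

-- ===== PORT B =====
-- bin(m)[2:] for m ≥ 1: MSB-first binary digit characters ('' for m = 0)
def pyBin (m : Nat) : List Char :=
  if m = 0 then [] else pyBin (m / 2) ++ [if m % 2 = 1 then '1' else '0']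
termination_by m
decreasing_by omega

def solve_alt (n : Int) : String :=
  if n ≤ 0 then "" else
    String.mk ((pyBin n.toNat).tail.foldl
      (fun acc b => let acc' := acc ++ ['B']; if b == '1' then acc' ++ ['A'] else acc') ['A'])

-- ===== PRECONDITION & SPEC =====
def Spec_solve (n : Int) (out : String) : Prop := out = solve_alt n
instance (n : Int) (out : String) : Decidable (Spec_solve n out) := by unfold Spec_solve; infer_instance

-- ===== CLAIM (what is proved, stated in full; the proofs are below) =====
def Claim_equal_solve : Prop := ∀ (n : Int), Dom_solve n → Spec_solve n (solve n)

-- ===== LEMMAS AND PROOFS =====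

theorem solveLoop_append (k : Nat) : ∀ (n : Int), n.toNat = k → ∀ ans,
    solveLoop n ans = ans ++ solveLoop n [] := by
  induction k using Nat.strong_induction_on with
  | _ k ih =>
    intro n hk ans
    rw [solveLoop]
    conv_rhs => rw [solveLoop]
    by_cases h : n > 0
    · simp only [dif_pos h]
      rw [PySem.Int.mod_eq_emod_of_pos (by omega), PySem.Int.floordiv_eq_ediv_of_pos (by omega)]
      by_cases he : n % 2 = 0
      · simp only [he, beq_self_eq_true, if_true, List.nil_append]
        rw [ih (n / 2).toNat (by omega) (n / 2) rfl (ans ++ ['B']),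
            ih (n / 2).toNat (by omega) (n / 2) rfl ['B']]
        simp
      · simp only [if_neg (show ¬((n % 2 == 0) = true) by simp; omega), List.nil_append]
        rw [ih (n - 1).toNat (by omega) (n - 1) rfl (ans ++ ['A']),
            ih (n - 1).toNat (by omega) (n - 1) rfl ['A']]
        simp
    · simp [dif_neg h]

theorem pyBin_ne_nil (m : Nat) (hm : m ≠ 0) : pyBin m ≠ [] := by
  rw [pyBin]; simp [hm]

theorem tail_append_singleton {α : Type} (xs : List α) (c : α) (h : xs ≠ []) :
    (xs ++ [c]).tail = xs.tail ++ [c] := by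
  cases xs with
  | nil => exact absurd rfl h
  | cons a t => simp

theorem solve_core (k : Nat) : ∀ (n : Int), 0 < n → n.toNat = k →
    (solveLoop n []).reverse =
      (pyBin n.toNat).tail.foldl
        (fun acc b => let acc' := acc ++ ['B']; if b == '1' then acc' ++ ['A'] else acc') ['A'] := by
  induction k using Nat.strong_induction_on with
  | _ k ih =>
    intro n hn hk
    rw [solveLoop]
    simp only [dif_pos hn]
    rw [PySem.Int.mod_eq_emod_of_pos (by omega), PySem.Int.floordiv_eq_ediv_of_pos (by omega)]
    by_cases he : n % 2 = 0
    · -- n even, n ≥ 2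
      have h2 : (2:Int) ≤ n := by omega
      simp only [he, beq_self_eq_true, if_true, List.nil_append]
      rw [solveLoop_append (n / 2).toNat (n / 2) rfl ['B']]
      have hrec := ih (n / 2).toNat (by omega) (n / 2) (by omega) rfl
      conv_rhs => rw [pyBin]
      have hmod : n.toNat % 2 = 0 := by omega
      have hdiv : (n / 2).toNat = n.toNat / 2 := by omega
      simp only [if_neg (show ¬ n.toNat = 0 by omega), hmod]
      rw [tail_append_singleton _ _ (pyBin_ne_nil _ (by omega)), List.foldl_append]
      simp only [List.reverse_append, List.reverse_cons, List.reverse_nil]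
      rw [hrec, hdiv]
      simp
    · -- n odd: unfold one more step (n - 1 is even)
      have hmod : n.toNat % 2 = 1 := by omega
      simp only [if_neg (show ¬((n % 2 == 0) = true) by simp; omega), List.nil_append]
      rw [solveLoop_append (n - 1).toNat (n - 1) rfl ['A']]
      by_cases h1 : n = 1
      · subst h1
        conv_rhs => rw [pyBin]
        simp [solveLoop, pyBin]
      · -- n ≥ 3
        have h3 : (3:Int) ≤ n := by omega
        rw [solveLoop]
        simp only [dif_pos (by omega : n - 1 > 0)]
        rw [PySem.Int.mod_eq_emod_of_pos (by omega), PySem.Int.floordiv_eq_ediv_of_pos (by omega)]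
        have he1 : (n - 1) % 2 = 0 := by omega
        simp only [he1, beq_self_eq_true, if_true, List.nil_append]
        rw [solveLoop_append ((n-1) / 2).toNat ((n-1) / 2) rfl ['B']]
        have hrec := ih ((n-1) / 2).toNat (by omega) ((n-1) / 2) (by omega) rfl
        conv_rhs => rw [pyBin]
        have hdiv : ((n-1) / 2).toNat = n.toNat / 2 := by omega
        simp only [if_neg (show ¬ n.toNat = 0 by omega), hmod]
        rw [tail_append_singleton _ _ (pyBin_ne_nil _ (by omega)), List.foldl_append]
        simp only [List.reverse_append, List.reverse_cons, List.reverse_nil, List.nil_append]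
        rw [hrec, hdiv]
        simp

-- ===== VERDICT (by name: the statement is the Claim_ definition above) =====
theorem solve_spec : Claim_equal_solve := by
  intro n _
  unfold Spec_solve solve solve_alt
  by_cases h : n ≤ 0
  · rw [solveLoop]
    simp only [dif_neg (by omega : ¬ n > 0), if_pos h]
    rfl
  · simp only [if_neg h]
    rw [solve_core n.toNat n (by omega) rfl]
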